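-- pv_equiv track=rewrite | github.com/Kerpeten1/NewOMDProcess | src/Find_Item_and_Manufacturer.py | check_if_pcs
-- ===== SOURCE A (Python) =====
-- def check_if_pcs(item):
--     # item is not a list of items, it is one item number (type: string)
--     alphabet = ["A","B","C","D","E","F","G","H","I","J","K","L","M","N","O","P","Q","R","S","T","U","V","W","X","Y","Z","Ü","Ö","Ä"]
--     if "-" in item:
--         item = "not PCS"
--         return item
--     for j in range(0, len(alphabet)-1):
--         if alphabet[j] in item:
--             item = "not PCS"
--             return item
--     return item
-- ===== SOURCE B (Python) =====
-- BAD = frozenset("ABCDEFGHIJKLMNOPQRSTUVWXYZ\u00dc\u00d6-")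
--
-- def check_if_pcs(item):
--     return "not PCS" if any(c in BAD for c in item) else item
-- ===== Notes on version B (the rewrite author's own statement) =====
-- stated objective: idiomatic
-- what changed: Instead of testing each of 28 alphabet letters as a substring of the item (plus a separate '-' check), B makes a single pass over the item's own characters against one fixed frozenset of trigger characters (A-Z, U-umlaut, O-umlaut, '-'; A-umlaut excluded exactly as A's off-by-one range does).
import Mathlib
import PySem

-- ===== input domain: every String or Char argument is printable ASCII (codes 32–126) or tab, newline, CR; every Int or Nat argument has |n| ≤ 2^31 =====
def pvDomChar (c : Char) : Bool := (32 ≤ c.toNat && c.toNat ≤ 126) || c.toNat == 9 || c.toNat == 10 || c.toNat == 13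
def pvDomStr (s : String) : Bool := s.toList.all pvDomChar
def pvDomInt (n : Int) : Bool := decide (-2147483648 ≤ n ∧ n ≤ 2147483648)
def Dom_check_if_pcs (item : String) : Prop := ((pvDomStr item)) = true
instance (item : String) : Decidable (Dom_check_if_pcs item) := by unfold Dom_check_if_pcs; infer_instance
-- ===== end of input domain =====

-- B replaces A's per-alphabet-letter substring scans by one pass over the item's own
-- characters against a fixed bad-character set (simpler/idiomatic; same exact behaviour).

-- ===== PORT A =====
def pvAlphabet : List String :=
  ["A","B","C","D","E","F","G","H","I","J","K","L","M","N","O","P","Q","R","S",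
   "T","U","V","W","X","Y","Z","Ü","Ö","Ä"]

def check_if_pcs (item : String) : String :=
  if PySem.Str.isIn "-" item then "not PCS"
  else if (PySem.List.pyRange 0 ((pvAlphabet.length : Int) - 1) 1).any
            (fun j => PySem.Str.isIn (PySem.List.pyGetD pvAlphabet j "") item)
       then "not PCS"
  else item

-- ===== PORT B =====
def pvBad : PySem.Set Char := PySem.Set.ofList "ABCDEFGHIJKLMNOPQRSTUVWXYZÜÖ-".toList

def check_if_pcs_alt (item : String) : String :=
  if item.toList.any (fun c => PySem.Set.contains pvBad c) then "not PCS" else item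

-- ===== PRECONDITION & SPEC =====
def Spec_check_if_pcs (item : String) (out : String) : Prop := out = check_if_pcs_alt item
instance (item : String) (out : String) : Decidable (Spec_check_if_pcs item out) := by unfold Spec_check_if_pcs; infer_instance

-- ===== CLAIM (what is proved, stated in full; the proofs are below) =====
def Claim_equal_check_if_pcs : Prop := ∀ (item : String), Dom_check_if_pcs item → Spec_check_if_pcs item (check_if_pcs item)

-- ===== LEMMAS AND PROOFS =====

theorem singleton_infix_iff (c : Char) (l : List Char) : ([c] <:+: l) ↔ c ∈ l := by
  constructor
  · intro h; exact List.singleton_sublist.mp h.sublist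
  · intro h
    obtain ⟨s, t, rfl⟩ := List.append_of_mem h
    exact ⟨s, t, by simp⟩

theorem isIn_single (sub : String) (c : Char) (h : sub.toList = [c]) (s : String) :
    PySem.Str.isIn sub s = true ↔ c ∈ s.toList := by
  rw [PySem.Str.isIn_iff_infix, h, singleton_infix_iff c]

set_option maxHeartbeats 2000000 in
theorem check_if_pcs_key (item : String) :
    (PySem.Str.isIn "-" item ||
      (PySem.List.pyRange 0 ((pvAlphabet.length : Int) - 1) 1).any
        (fun j => PySem.Str.isIn (PySem.List.pyGetD pvAlphabet j "") item)) =
    item.toList.any (fun c => PySem.Set.contains pvBad c) := by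
  have hrange : PySem.List.pyRange 0 ((pvAlphabet.length : Int) - 1) 1 =
      [0,1,2,3,4,5,6,7,8,9,10,11,12,13,14,15,16,17,18,19,20,21,22,23,24,25,26,27] := by decide
  have e0 : PySem.List.pyGetD pvAlphabet 0 "" = "A" := by decide
  have e1 : PySem.List.pyGetD pvAlphabet 1 "" = "B" := by decide
  have e2 : PySem.List.pyGetD pvAlphabet 2 "" = "C" := by decide
  have e3 : PySem.List.pyGetD pvAlphabet 3 "" = "D" := by decide
  have e4 : PySem.List.pyGetD pvAlphabet 4 "" = "E" := by decide
  have e5 : PySem.List.pyGetD pvAlphabet 5 "" = "F" := by decide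
  have e6 : PySem.List.pyGetD pvAlphabet 6 "" = "G" := by decide
  have e7 : PySem.List.pyGetD pvAlphabet 7 "" = "H" := by decide
  have e8 : PySem.List.pyGetD pvAlphabet 8 "" = "I" := by decide
  have e9 : PySem.List.pyGetD pvAlphabet 9 "" = "J" := by decide
  have e10 : PySem.List.pyGetD pvAlphabet 10 "" = "K" := by decide
  have e11 : PySem.List.pyGetD pvAlphabet 11 "" = "L" := by decide
  have e12 : PySem.List.pyGetD pvAlphabet 12 "" = "M" := by decide
  have e13 : PySem.List.pyGetD pvAlphabet 13 "" = "N" := by decide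
  have e14 : PySem.List.pyGetD pvAlphabet 14 "" = "O" := by decide
  have e15 : PySem.List.pyGetD pvAlphabet 15 "" = "P" := by decide
  have e16 : PySem.List.pyGetD pvAlphabet 16 "" = "Q" := by decide
  have e17 : PySem.List.pyGetD pvAlphabet 17 "" = "R" := by decide
  have e18 : PySem.List.pyGetD pvAlphabet 18 "" = "S" := by decide
  have e19 : PySem.List.pyGetD pvAlphabet 19 "" = "T" := by decide
  have e20 : PySem.List.pyGetD pvAlphabet 20 "" = "U" := by decide
  have e21 : PySem.List.pyGetD pvAlphabet 21 "" = "V" := by decide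
  have e22 : PySem.List.pyGetD pvAlphabet 22 "" = "W" := by decide
  have e23 : PySem.List.pyGetD pvAlphabet 23 "" = "X" := by decide
  have e24 : PySem.List.pyGetD pvAlphabet 24 "" = "Y" := by decide
  have e25 : PySem.List.pyGetD pvAlphabet 25 "" = "Z" := by decide
  have e26 : PySem.List.pyGetD pvAlphabet 26 "" = "Ü" := by decide
  have e27 : PySem.List.pyGetD pvAlphabet 27 "" = "Ö" := by decide
  have hperm : pvBad.Perm ('-' :: ['A','B','C','D','E','F','G','H','I','J','K','L','M','N','O','P','Q','R','S','T','U','V','W','X','Y','Z','Ü','Ö']) := by decide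
  have hc : ∀ x : Char, (List.contains pvBad x = true) ↔
      x ∈ ('-' :: ['A','B','C','D','E','F','G','H','I','J','K','L','M','N','O','P','Q','R','S','T','U','V','W','X','Y','Z','Ü','Ö']) :=
    fun x => by rw [List.contains_iff_mem, hperm.mem_iff]
  rw [Bool.eq_iff_iff, Bool.or_eq_true, List.any_eq_true, List.any_eq_true, hrange]
  simp only [List.mem_cons, List.not_mem_nil, or_false, or_and_right, exists_or, exists_eq_left,
    isIn_single "A" 'A' rfl, isIn_single "B" 'B' rfl, isIn_single "C" 'C' rfl, isIn_single "D" 'D' rfl, isIn_single "E" 'E' rfl, isIn_single "F" 'F' rfl, isIn_single "G" 'G' rfl, isIn_single "H" 'H' rfl, isIn_single "I" 'I' rfl, isIn_single "J" 'J' rfl, isIn_single "K" 'K' rfl, isIn_single "L" 'L' rfl, isIn_single "M" 'M' rfl, isIn_single "N" 'N' rfl, isIn_single "O" 'O' rfl, isIn_single "P" 'P' rfl, isIn_single "Q" 'Q' rfl, isIn_single "R" 'R' rfl, isIn_single "S" 'S' rfl, isIn_single "T" 'T' rfl, isIn_single "U" 'U' rfl, isIn_single "V" 'V' rfl, isIn_single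 "W" 'W' rfl, isIn_single "X" 'X' rfl, isIn_single "Y" 'Y' rfl, isIn_single "Z" 'Z' rfl, isIn_single "Ü" 'Ü' rfl, isIn_single "Ö" 'Ö' rfl, isIn_single "-" '-' rfl,
    PySem.Set.contains, hperm.mem_iff, List.contains_cons, List.contains_nil,
    e0,e1,e2,e3,e4,e5,e6,e7,e8,e9,e10,e11,e12,e13,e14,e15,e16,e17,e18,e19,e20,e21,e22,e23,e24,e25,e26,e27]

  simp only [hc, List.mem_cons, List.not_mem_nil, or_false, and_or_left, exists_or, exists_eq_right, exists_eq_left]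


-- ===== VERDICT (by name: the statement is the Claim_ definition above) =====
theorem check_if_pcs_spec : Claim_equal_check_if_pcs := by
  intro item _
  unfold Spec_check_if_pcs check_if_pcs check_if_pcs_alt
  have key := check_if_pcs_key item
  cases h1 : PySem.Str.isIn "-" item <;>
  cases h2 : (PySem.List.pyRange 0 ((pvAlphabet.length : Int) - 1) 1).any
        (fun j => PySem.Str.isIn (PySem.List.pyGetD pvAlphabet j "") item) <;>
  rw [h1, h2] at key <;> simp only [Bool.false_or, Bool.true_or, Bool.or_self] at key <;>
  simp only [← key, Bool.false_eq_true, if_false, if_true, ite_self]
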